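-- pv_equiv track=rewrite | github.com/adnathanail/project_euler | 051-100/U072 - Counting fractions.py | genfracs
-- ===== SOURCE A (Python) =====
-- from math import gcd
--
-- def reduce(a,b):
--   g = gcd(a,b)
--   return [int(a/g),int(b/g)]
--
-- def genfracs(maxd):
--   fracs = []
--   for d in range(1,maxd+1):
--     for n in range(1, d):
--       r = reduce(n,d)
--       if r not in fracs:
--         fracs.append(r)
--   return fracs
-- ===== SOURCE B (Python) =====
-- from math import gcd
--
-- def genfracs(maxd):
--     # A reduced fraction a/b first appears in A's scan exactly at d=b, n=a,
--     # so listing coprime pairs in (d, n) order reproduces A's list with no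
--     # reduce helper and no quadratic membership scan.
--     return [[n, d] for d in range(1, maxd + 1) for n in range(1, d) if gcd(n, d) == 1]
-- ===== Notes on version B (the rewrite author's own statement) =====
-- stated objective: faster
-- what changed: B drops the reduce helper and the 'r not in fracs' linear dedup scan entirely: a reduced fraction a/b first appears exactly at d=b, n=a, so emitting [n,d] whenever gcd(n,d)==1 in the same (d,n) order yields the identical list.
import Mathlib
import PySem

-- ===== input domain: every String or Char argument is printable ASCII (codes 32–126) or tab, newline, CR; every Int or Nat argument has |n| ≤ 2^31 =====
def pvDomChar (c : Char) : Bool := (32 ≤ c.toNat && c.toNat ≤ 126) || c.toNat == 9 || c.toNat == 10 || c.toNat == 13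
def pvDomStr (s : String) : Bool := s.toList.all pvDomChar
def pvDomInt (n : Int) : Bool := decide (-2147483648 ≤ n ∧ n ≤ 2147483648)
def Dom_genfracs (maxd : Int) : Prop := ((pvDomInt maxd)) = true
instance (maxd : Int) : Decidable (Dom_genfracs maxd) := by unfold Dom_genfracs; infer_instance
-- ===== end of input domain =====

-- B replaces A's reduce helper and linear 'r not in fracs' dedup scan by emitting [n,d]
-- exactly when gcd(n,d)=1, in the same (d,n) order (a reduced fraction first appears at d=b,n=a).

-- ===== PORT A =====
-- Python's `int(a/g)` is float division truncated; at A's call sites g = gcd(a,b) > 0 divides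
-- both arguments exactly and all values are positive, so it is exact integer division (ported as /).
def pyReduce (a b : Int) : List Int :=
  let g : Int := Int.gcd a b
  [a / g, b / g]

def genfracs (maxd : Int) : List (List Int) :=
  (PySem.List.pyRange 1 (maxd + 1) 1).foldl (fun fracs d =>
    (PySem.List.pyRange 1 d 1).foldl (fun fracs n =>
      let r := pyReduce n d
      if r ∈ fracs then fracs else fracs ++ [r]) fracs) []

-- ===== PORT B =====
def genfracs_alt (maxd : Int) : List (List Int) :=
  (PySem.List.pyRange 1 (maxd + 1) 1).flatMap (fun d =>
    ((PySem.List.pyRange 1 d 1).filter (fun n => Int.gcd n d == 1)).map (fun n => [n, d]))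

-- ===== PRECONDITION & SPEC =====
def Spec_genfracs (maxd : Int) (out : List (List Int)) : Prop := out = genfracs_alt maxd
instance (maxd : Int) (out : List (List Int)) : Decidable (Spec_genfracs maxd out) := by unfold Spec_genfracs; infer_instance

-- ===== CLAIM (what is proved, stated in full; the proofs are below) =====
def Claim_equal_genfracs : Prop := ∀ (maxd : Int), Dom_genfracs maxd → Spec_genfracs maxd (genfracs maxd)

-- ===== LEMMAS AND PROOFS =====

/-- A's inner-loop step function (the lambda of `genfracs`, named for the proofs). -/
def stepA (d : Int) (fracs : List (List Int)) (n : Int) : List (List Int) :=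
  let r := pyReduce n d
  if r ∈ fracs then fracs else fracs ++ [r]

/-- The coprime pairs `[n, d]` with `1 ≤ n < b`, in order. -/
def upTo (d b : Int) : List (List Int) :=
  ((PySem.List.pyRange 1 b 1).filter (fun n => Int.gcd n d == 1)).map (fun n => [n, d])

/-- B's output as a function of the bound. -/
def F (m : Int) : List (List Int) :=
  (PySem.List.pyRange 1 (m + 1) 1).flatMap (fun d => upTo d d)

lemma genfracs_eq (maxd : Int) :
    genfracs maxd =
      (PySem.List.pyRange 1 (maxd + 1) 1).foldl
        (fun fracs d => (PySem.List.pyRange 1 d 1).foldl (stepA d) fracs) [] := rfl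

lemma genfracs_alt_eq (maxd : Int) : genfracs_alt maxd = F maxd := rfl

lemma mem_F (m : Int) (x : List Int) :
    x ∈ F m ↔ ∃ n d : Int, 1 ≤ n ∧ n < d ∧ d ≤ m ∧ Int.gcd n d = 1 ∧ x = [n, d] := by
  simp only [F, upTo, List.mem_flatMap, List.mem_map, List.mem_filter,
    PySem.List.mem_pyRange_one, beq_iff_eq]
  constructor
  · rintro ⟨d, ⟨hd1, hd2⟩, n, ⟨⟨hn1, hn2⟩, hg⟩, rfl⟩
    exact ⟨n, d, hn1, hn2, by omega, hg, rfl⟩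
  · rintro ⟨n, d, hn1, hn2, hdm, hg, rfl⟩
    exact ⟨d, ⟨by omega, by omega⟩, n, ⟨⟨hn1, hn2⟩, hg⟩, rfl⟩

lemma reduce_cases (n d : Int) (h1 : 1 ≤ n) (h2 : n < d) :
    (Int.gcd n d = 1 ∧ pyReduce n d = [n, d]) ∨
    (Int.gcd n d ≠ 1 ∧ ∃ a b : Int, pyReduce n d = [a, b] ∧ 1 ≤ a ∧ a < b ∧ b < d ∧ Int.gcd a b = 1) := by
  by_cases hg : Int.gcd n d = 1
  · left
    refine ⟨hg, ?_⟩
    simp [pyReduce, hg]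
  · right
    refine ⟨hg, ?_⟩
    have hgpos : 0 < Int.gcd n d := Int.gcd_pos_iff.2 (Or.inl (by omega))
    set G : Int := (Int.gcd n d : Int) with hG
    have hdvd1 : G ∣ n := Int.gcd_dvd_left n d
    have hdvd2 : G ∣ d := Int.gcd_dvd_right n d
    obtain ⟨a, ha⟩ := hdvd1
    obtain ⟨b, hb⟩ := hdvd2
    have hgpos' : (0 : Int) < G := by rw [hG]; exact_mod_cast hgpos
    have hg2 : (2 : Int) ≤ G := by
      have h2' : 2 ≤ Int.gcd n d := by omega
      rw [hG]; exact_mod_cast h2'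
    have hne : G ≠ 0 := by omega
    have ha1 : 1 ≤ a := by nlinarith [ha, h1, hgpos']
    have hab : a < b := by
      have hlt : G * a < G * b := by rw [← ha, ← hb]; exact h2
      exact lt_of_mul_lt_mul_left hlt (by omega)
    have hone : Int.gcd a b = 1 := by
      have hmul : Int.gcd n d = Int.gcd n d * Int.gcd a b := by
        conv_lhs => rw [ha, hb]
        rw [Int.gcd_mul_left G a b, hG, Int.natAbs_natCast]
      exact Nat.eq_of_mul_eq_mul_left hgpos (by rw [Nat.mul_one]; exact hmul.symm)
    refine ⟨a, b, ?_, ha1, hab, ?_, hone⟩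
    · simp only [pyReduce, ← hG]
      rw [show n / G = a from by rw [ha]; exact Int.mul_ediv_cancel_left a hne,
        show d / G = b from by rw [hb]; exact Int.mul_ediv_cancel_left b hne]
    · have hb1 : 1 ≤ b := by omega
      nlinarith [hb, hg2, hb1]

lemma upTo_succ_pos (d b : Int) (hb1 : 1 ≤ b) (hg : Int.gcd b d = 1) :
    upTo d (b + 1) = upTo d b ++ [[b, d]] := by
  simp only [upTo]
  rw [PySem.List.pyRange_one_succ_right hb1]
  simp [List.filter_append, hg]

lemma upTo_succ_neg (d b : Int) (hb1 : 1 ≤ b) (hg : Int.gcd b d ≠ 1) :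
    upTo d (b + 1) = upTo d b := by
  simp only [upTo]
  rw [PySem.List.pyRange_one_succ_right hb1]
  simp [List.filter_append, hg]

lemma inner_fold (d : Int) (s : List (List Int))
    (H1 : ∀ n : Int, [n, d] ∉ s)
    (H2 : ∀ a b : Int, 1 ≤ a → a < b → b < d → Int.gcd a b = 1 → [a, b] ∈ s)
    (k : Nat) (hk : 1 + (k : Int) ≤ d) :
    (PySem.List.pyRange 1 (1 + (k : Int)) 1).foldl (stepA d) s = s ++ upTo d (1 + (k : Int)) := by
  induction k with
  | zero =>
      simp [upTo]
  | succ k ih =>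
      have hcast : (1 + ((k + 1 : Nat) : Int)) = (1 + (k : Int)) + 1 := by push_cast; ring
      rw [hcast]
      rw [PySem.List.pyRange_one_succ_right (by omega : (1 : Int) ≤ 1 + (k : Int))]
      rw [List.foldl_append]
      rw [ih (by push_cast at hk; omega)]
      set b : Int := 1 + (k : Int) with hbdef
      have hb1 : 1 ≤ b := by omega
      have hbd : b < d := by push_cast at hk; omega
      simp only [List.foldl_cons, List.foldl_nil]
      rcases reduce_cases b d hb1 hbd with ⟨hg, hr⟩ | ⟨hg, a, b', hr, hp1, hp2, hp3, hp4⟩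
      · have hnot : [b, d] ∉ s ++ upTo d b := by
          intro hmem
          rcases List.mem_append.1 hmem with h | h
          · exact H1 b h
          · simp only [upTo, List.mem_map, List.mem_filter, PySem.List.mem_pyRange_one] at h
            obtain ⟨n, ⟨⟨_, hn2⟩, _⟩, heq⟩ := h
            have : n = b := by
              have := List.head_eq_of_cons_eq heq
              omega
            omega
        rw [stepA, hr, if_neg hnot]
        rw [upTo_succ_pos d b hb1 hg]
        simp [List.append_assoc]
      · have hmem : pyReduce b d ∈ s ++ upTo d b := by
          rw [hr]
          exact List.mem_append.2 (Or.inl (H2 a b' hp1 hp2 hp3 hp4))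
        rw [stepA, if_pos hmem]
        rw [upTo_succ_neg d b hb1 hg]

lemma outer_fold (k : Nat) :
    (PySem.List.pyRange 1 ((k : Int) + 1) 1).foldl
      (fun fracs d => (PySem.List.pyRange 1 d 1).foldl (stepA d) fracs) [] = F (k : Int) := by
  induction k with
  | zero =>
      simp [F]
  | succ k ih =>
      have hcast : (((k + 1 : Nat) : Int) + 1) = ((k : Int) + 1) + 1 := by push_cast; ring
      have hcast2 : ((k + 1 : Nat) : Int) = (k : Int) + 1 := by push_cast; ring
      rw [hcast]
      rw [PySem.List.pyRange_one_succ_right (by omega : (1 : Int) ≤ (k : Int) + 1)]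
      rw [List.foldl_append, ih]
      simp only [List.foldl_cons, List.foldl_nil]
      have h1 : ∀ n : Int, [n, (k : Int) + 1] ∉ F (k : Int) := by
        intro n hmem
        rcases (mem_F _ _).1 hmem with ⟨n', d', _, _, hdm, _, heq⟩
        have : (k : Int) + 1 = d' := by
          have := List.head_eq_of_cons_eq (List.tail_eq_of_cons_eq heq)
          omega
        omega
      have h2 : ∀ a b : Int, 1 ≤ a → a < b → b < (k : Int) + 1 → Int.gcd a b = 1 →
          [a, b] ∈ F (k : Int) := by
        intro a b ha hab hbd hg
        exact (mem_F _ _).2 ⟨a, b, ha, hab, by omega, hg, rfl⟩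
      have hmain := inner_fold ((k : Int) + 1) (F (k : Int)) h1 h2 k (by omega)
      rw [show (1 + (k : Int)) = (k : Int) + 1 from by ring] at hmain
      rw [hmain, hcast2]
      simp only [F]
      rw [PySem.List.pyRange_one_succ_right (by omega : (1 : Int) ≤ (k : Int) + 1)]
      rw [List.flatMap_append]
      simp

-- ===== VERDICT (by name: the statement is the Claim_ definition above) =====
theorem genfracs_spec : Claim_equal_genfracs := by
  intro maxd _
  unfold Spec_genfracs
  by_cases h : maxd ≤ 0
  · have hnil : maxd + 1 ≤ 1 := by omega
    simp [genfracs, genfracs_alt, PySem.List.pyRange_one_eq_nil hnil]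
  · have hk : maxd = ((maxd.toNat : Nat) : Int) := by omega
    rw [genfracs_eq, genfracs_alt_eq, hk]
    exact outer_fold maxd.toNat
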